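-- pv_equiv track=rewrite | github.com/KonradMarzec1991/Codewars-LeetCode | Python/6kyu/6kyu_Most Consecutive Zeros of a Binary Number.py | max_consec_zeros
-- ===== SOURCE A (Python) =====
-- def max_consec_zeros(n):
--     my_nums = {
--         0: 'Zero', 1: 'One',
--         2: 'Two', 3: 'Three',
--         4: 'Four', 5: 'Five',
--         6: 'Six', 7: 'Seven',
--         8: 'Eight', 9: 'Nine',
--         10: 'Ten', 11: 'Eleven',
--         12: 'Twelve', 13: 'Thirteen'
--     }
--     n = bin(int(n))[2:]
--     t_maximum, maximum = 0, 0
--     for ch in n: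
--         if ch == '0':
--             t_maximum += 1
--         if ch == '1':
--             t_maximum = 0
--         if t_maximum > maximum:
--             maximum = t_maximum
--     return my_nums[maximum]
-- ===== SOURCE B (Python) =====
-- def max_consec_zeros(n):
--     my_nums = {
--         0: 'Zero', 1: 'One',
--         2: 'Two', 3: 'Three',
--         4: 'Four', 5: 'Five',
--         6: 'Six', 7: 'Seven',
--         8: 'Eight', 9: 'Nine',
--         10: 'Ten', 11: 'Eleven',
--         12: 'Twelve', 13: 'Thirteen'
--     }
--     s = bin(abs(int(n)))[2:]
--     longest = max(len(run) for run in s.split('1'))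
--     return my_nums[longest]
-- ===== Notes on version B (the rewrite author's own statement) =====
-- stated objective: simpler
-- what changed: Replaces the hand-threaded running-maximum character loop (t_maximum/maximum state) by splitting the binary string of abs(n) on '1' and taking the max of the group lengths.
import Mathlib
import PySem

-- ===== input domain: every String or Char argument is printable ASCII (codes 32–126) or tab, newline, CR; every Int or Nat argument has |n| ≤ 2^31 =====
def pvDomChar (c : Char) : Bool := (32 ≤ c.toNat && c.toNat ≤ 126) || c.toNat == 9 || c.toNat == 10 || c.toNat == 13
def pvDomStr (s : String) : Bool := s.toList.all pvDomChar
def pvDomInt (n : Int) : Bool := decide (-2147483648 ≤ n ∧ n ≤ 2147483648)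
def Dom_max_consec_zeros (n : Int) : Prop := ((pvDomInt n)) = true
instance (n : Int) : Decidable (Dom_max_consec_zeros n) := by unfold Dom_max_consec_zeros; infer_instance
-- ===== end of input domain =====

-- B replaces A's hand-threaded running-maximum character loop by splitting the binary
-- string of abs(n) on '1' and taking the max group length (objective: simpler).

-- ===== PORT A =====
-- the number-word dict both Pythons build literally (the same literal appears in Source A and Source B)
def pvMyNums : PySem.Dict Int String := PySem.Dict.ofList
  [(0, "Zero"), (1, "One"), (2, "Two"), (3, "Three"), (4, "Four"), (5, "Five"),
   (6, "Six"), (7, "Seven"), (8, "Eight"), (9, "Nine"), (10, "Ten"), (11, "Eleven"),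
   (12, "Twelve"), (13, "Thirteen")]

-- one iteration of A's `for ch in n` loop, state = (t_maximum, maximum)
def pvLoopA (st : Int × Int) (ch : Char) : Int × Int :=
  let t1 := if ch = '0' then st.1 + 1 else st.1
  let t2 := if ch = '1' then 0 else t1
  let m := if t2 > st.2 then t2 else st.2
  (t2, m)

def max_consec_zeros (n : Int) : String :=
  let s := PySem.Str.slice (PySem.Int.pyBin n) (some 2)   -- n = bin(int(n))[2:]
  let r := s.toList.foldl pvLoopA (0, 0)
  -- my_nums[maximum]: KeyError on a too-long zero run; Pre_ excludes exactly those n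
  (pvMyNums.get? r.2).getD ""

-- ===== PORT B =====
def max_consec_zeros_alt (n : Int) : String :=
  let s := PySem.Str.slice (PySem.Int.pyBin (Int.natAbs n : Int)) (some 2)  -- bin(abs(int(n)))[2:]
  let groups := (PySem.Str.split? s "1").getD []          -- s.split('1'); sep "1" ≠ "" so never none
  -- max(len(run) for run in groups); groups is never empty, so max? is never none
  let longest := (PySem.List.max? (groups.map PySem.Str.len) (fun x => x)).getD 0
  -- my_nums[longest]: KeyError on a too-long zero run; Pre_ excludes exactly those n
  (pvMyNums.get? longest).getD ""

-- ===== PRECONDITION & SPEC =====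
-- Pre_ excludes exactly the n whose binary representation contains fourteen or more consecutive
-- zero bits below the leading bit: there both Pythons raise KeyError (the word dict ends at Thirteen).
def Pre_max_consec_zeros (n : Int) : Prop :=
  ∀ i : Nat, i < 32 → ¬ ((n.natAbs / 2 ^ i) % 2 ^ 14 = 0 ∧ 2 ^ (i + 14) ≤ n.natAbs)
instance (n : Int) : Decidable (Pre_max_consec_zeros n) := by
  unfold Pre_max_consec_zeros; infer_instance
def pvWitness_max_consec_zeros : Int := (8)

def Spec_max_consec_zeros (n : Int) (out : String) : Prop := out = max_consec_zeros_alt n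
instance (n : Int) (out : String) : Decidable (Spec_max_consec_zeros n out) := by
  unfold Spec_max_consec_zeros; infer_instance

-- ===== CLAIM (what is proved, stated in full; the proofs are below) =====
def Claim_equal_max_consec_zeros : Prop := ∀ (n : Int), Dom_max_consec_zeros n → Pre_max_consec_zeros n → Spec_max_consec_zeros n (max_consec_zeros n)

-- ===== LEMMAS AND PROOFS =====

-- proof-side recursive description of s.split('1') on a list of chars
def pvGroups : List Char → List (List Char)
  | [] => [[]]
  | c :: t =>
    if c = '1' then [] :: pvGroups t
    else match pvGroups t with
      | [] => [[c]]
      | g :: gs => (c :: g) :: gs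

-- max over group lengths, the first group seen through a carry t
def pvM (t : Int) : List (List Char) → Int
  | [] => t
  | g :: gs => gs.foldl (fun a x => max a (x.length : Int)) (t + (g.length : Int))

theorem pvGroups_ne_nil (l : List Char) : pvGroups l ≠ [] := by
  cases l with
  | nil => simp [pvGroups]
  | cons c t =>
    simp only [pvGroups]
    split
    · simp
    · rcases h : pvGroups t with _ | ⟨g, gs⟩ <;> simp

theorem pvSplitOn_go_eq : ∀ (fuel : Nat) (l cur : List Char) (acc : List (List Char)),
    l.length < fuel →
    PySem.Chars.splitOn.go ['1'] fuel l cur acc =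
      acc.reverse ++ (match pvGroups l with
        | [] => []
        | g :: gs => (cur.reverse ++ g) :: gs) := by
  intro fuel
  induction fuel with
  | zero => intro l cur acc h; omega
  | succ f ih =>
    intro l cur acc h
    cases l with
    | nil =>
      rw [PySem.Chars.splitOn.go]
      · simp [pvGroups]
      · omega
    | cons c t =>
      rw [PySem.Chars.splitOn.go]
      by_cases hc : c = '1'
      · subst hc
        have hp : List.isPrefixOf ['1'] ('1' :: t) = true := by
          simp [List.isPrefixOf]
        simp only [hp, if_pos, List.length_cons, List.length_nil, List.drop_succ_cons,
          List.drop_zero]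
        rw [ih t [] ((cur.reverse) :: acc) (by simpa using Nat.lt_of_succ_lt_succ (by simpa using h))]
        rcases hg : pvGroups t with _ | ⟨g, gs⟩
        · exact absurd hg (pvGroups_ne_nil t)
        · simp [pvGroups, hg]
      · have hp : List.isPrefixOf ['1'] (c :: t) = false := by
          simp [List.isPrefixOf]
          intro hh; exact hc hh.symm
        simp only [hp]
        rw [ih t (c :: cur) acc (by simpa using Nat.lt_of_succ_lt_succ (by simpa using h))]
        rcases hg : pvGroups t with _ | ⟨g, gs⟩
        · exact absurd hg (pvGroups_ne_nil t)
        · simp [pvGroups, hg, hc]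

theorem pvSplitOn_eq (l : List Char) : PySem.Chars.splitOn l ['1'] = pvGroups l := by
  rw [PySem.Chars.splitOn, pvSplitOn_go_eq (l.length + 1) l [] [] (by omega)]
  rcases hg : pvGroups l with _ | ⟨g, gs⟩
  · exact absurd hg (pvGroups_ne_nil l)
  · simp

theorem pvFoldlMax_max (p q : Int) (l : List (List Char)) :
    l.foldl (fun a x => max a (x.length : Int)) (max p q) =
      max p (l.foldl (fun a x => max a (x.length : Int)) q) := by
  induction l generalizing q with
  | nil => rfl
  | cons x t ih => simp only [List.foldl_cons, max_assoc]; exact ih _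

theorem pv_init_le_foldl (q : Int) (l : List (List Char)) :
    q ≤ l.foldl (fun a x => max a (x.length : Int)) q := by
  have h := (PySem.List.le_foldl_max (κ := Int) (l.map (fun x => (x.length : Int))) q).1
  rwa [List.foldl_map] at h

theorem pv_le_pvM (t : Int) (gl : List (List Char)) : t ≤ pvM t gl := by
  cases gl with
  | nil => exact le_refl t
  | cons g gs =>
    have h := pv_init_le_foldl (t + (g.length : Int)) gs
    have : t ≤ t + (g.length : Int) := by
      have := Int.natCast_nonneg g.length; omega
    simp only [pvM]; omega

theorem pvFold_eq : ∀ (l : List Char) (t m : Int), (∀ c ∈ l, c = '0' ∨ c = '1') →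
    0 ≤ t → t ≤ m → (l.foldl pvLoopA (t, m)).2 = max m (pvM t (pvGroups l)) := by
  intro l
  induction l with
  | nil => intro t m _ h0 htm; simp [pvM, pvGroups, max_eq_left htm]
  | cons c tl ih =>
    intro t m hc h0 htm
    rcases hc c (by simp) with h | h
    · subst h
      have hstep : pvLoopA (t, m) '0' = (t + 1, max m (t + 1)) := by
        simp only [pvLoopA, if_neg (by decide : ¬ ('0' = '1'))]
        simp [max_def]; split_ifs <;> omega
      rw [List.foldl_cons, hstep,
        ih (t + 1) (max m (t + 1)) (fun c hm => hc c (by simp [hm])) (by omega) (le_max_right _ _)]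
      rcases hg : pvGroups tl with _ | ⟨g, gs⟩
      · exact absurd hg (pvGroups_ne_nil tl)
      · have hG : pvGroups ('0' :: tl) = ('0' :: g) :: gs := by
          simp [pvGroups, hg]
        rw [hG]
        simp only [pvM, List.length_cons]
        rw [show t + ((g.length + 1 : Nat) : Int) = (t + 1) + (g.length : Int) from by push_cast; ring]
        have hX := pv_init_le_foldl ((t + 1) + (g.length : Int)) gs
        set X := gs.foldl (fun a x => max a (x.length : Int)) ((t + 1) + (g.length : Int)) with hXdef
        have h1 : t + 1 ≤ X := by
          have := Int.natCast_nonneg g.length; omega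
        simp only [max_def]; split_ifs <;> omega
    · subst h
      have hstep : pvLoopA (t, m) '1' = (0, m) := by
        simp only [pvLoopA, if_neg (by decide : ¬ ('1' = '0'))]
        simp; omega
      rw [List.foldl_cons, hstep,
        ih 0 m (fun c hm => hc c (by simp [hm])) le_rfl (by omega)]
      rcases hg : pvGroups tl with _ | ⟨g, gs⟩
      · exact absurd hg (pvGroups_ne_nil tl)
      · have hG : pvGroups ('1' :: tl) = [] :: g :: gs := by
          simp [pvGroups, hg]
        rw [hG]
        simp only [pvM, List.length_nil, Nat.cast_zero, add_zero, List.foldl_cons, zero_add]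
        rw [pvFoldlMax_max t ((g.length : Int)) gs]
        set Y := gs.foldl (fun a x => max a (x.length : Int)) ((g.length : Int)) with hY
        simp only [max_def]; split_ifs <;> omega

theorem pvDigits01 : ∀ (fuel n : Nat) (acc : List Char), (∀ c ∈ acc, c = '0' ∨ c = '1') →
    ∀ c ∈ Nat.toDigitsCore 2 fuel n acc, c = '0' ∨ c = '1' := by
  intro fuel
  induction fuel with
  | zero => intro n acc hacc; rw [Nat.toDigitsCore]; exact hacc
  | succ f ih =>
    intro n acc hacc
    rw [Nat.toDigitsCore]
    have hd : (n % 2).digitChar = '0' ∨ (n % 2).digitChar = '1' := by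
      rcases Nat.mod_two_eq_zero_or_one n with h | h <;> rw [h] <;> simp [Nat.digitChar]
    have hacc2 : ∀ c ∈ (n % 2).digitChar :: acc, c = '0' ∨ c = '1' := by
      intro c hc
      rcases List.mem_cons.mp hc with hc | hc
      · exact hc ▸ hd
      · exact hacc c hc
    split
    · exact hacc2
    · exact ih (n / 2) _ hacc2

theorem pvToDigits01 (m : Nat) : ∀ c ∈ Nat.toDigits 2 m, c = '0' ∨ c = '1' :=
  pvDigits01 (m + 1) m [] (by simp)

-- A's loop result is the max zero-run, described through pvGroups/pvM
theorem pvA_key (n : Int) :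
    ((PySem.Str.slice (PySem.Int.pyBin n) (some 2)).toList.foldl pvLoopA (0, 0)).2 =
      pvM 0 (pvGroups (Nat.toDigits 2 n.natAbs)) := by
  have hslice : (PySem.Str.slice (PySem.Int.pyBin n) (some 2)).toList =
      (PySem.Int.toBinChars0b n).drop 2 := by
    simp only [PySem.Str.slice, String.toList_ofList, PySem.Int.toList_pyBin,
      PySem.Chars.slice]
    rw [PySem.List.slice_from _ (by norm_num)]
    rfl
  rw [hslice]
  have hdig := pvToDigits01 n.natAbs
  have hfold := pvFold_eq (Nat.toDigits 2 n.natAbs) 0 0 hdig le_rfl le_rfl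
  have hmax : max 0 (pvM 0 (pvGroups (Nat.toDigits 2 n.natAbs))) =
      pvM 0 (pvGroups (Nat.toDigits 2 n.natAbs)) :=
    max_eq_right (pv_le_pvM 0 _)
  by_cases hn : n < 0
  · have : PySem.Int.toBinChars0b n = '-' :: '0' :: 'b' :: Nat.toDigits 2 n.natAbs := by
      simp [PySem.Int.toBinChars0b, hn]
    rw [this]
    show ((('b' :: Nat.toDigits 2 n.natAbs)).foldl pvLoopA (0, 0)).2 = _
    rw [List.foldl_cons]
    have hb : pvLoopA (0, 0) 'b' = (0, 0) := by decide
    rw [hb, hfold, hmax]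
  · have : PySem.Int.toBinChars0b n = '0' :: 'b' :: Nat.toDigits 2 n.toNat := by
      simp [PySem.Int.toBinChars0b, hn]
    rw [this]
    show ((Nat.toDigits 2 n.toNat).foldl pvLoopA (0, 0)).2 = _
    rw [show n.toNat = n.natAbs from by omega]
    rw [hfold, hmax]

-- B's split-then-max value is the same quantity
theorem pvB_key (n : Int) :
    ((PySem.List.max?
        ((((PySem.Str.split? (PySem.Str.slice (PySem.Int.pyBin (Int.natAbs n : Int)) (some 2)) "1").getD []).map
          PySem.Str.len)) (fun x => x)).getD 0) =
      pvM 0 (pvGroups (Nat.toDigits 2 n.natAbs)) := by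
  have hslice : (PySem.Str.slice (PySem.Int.pyBin (Int.natAbs n : Int)) (some 2)).toList =
      Nat.toDigits 2 n.natAbs := by
    simp only [PySem.Str.slice, String.toList_ofList, PySem.Int.toList_pyBin,
      PySem.Chars.slice]
    rw [PySem.List.slice_from _ (by norm_num)]
    have : PySem.Int.toBinChars0b (Int.natAbs n : Int) =
        '0' :: 'b' :: Nat.toDigits 2 n.natAbs := by
      rw [PySem.Int.toBinChars0b, if_neg (not_lt.mpr (Int.natCast_nonneg _)),
        Int.toNat_natCast]
    rw [this]
    rfl
  rw [PySem.Str.split?]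
  rw [show ("1" : String).toList = ['1'] from rfl]
  rw [PySem.Chars.split?]
  simp only [List.isEmpty_cons, if_neg Bool.false_ne_true]
  rw [hslice, pvSplitOn_eq]
  rcases hg : pvGroups (Nat.toDigits 2 n.natAbs) with _ | ⟨g, gs⟩
  · exact absurd hg (pvGroups_ne_nil _)
  · simp only [Option.map_some, Option.getD_some, List.map_cons, List.map_map]
    have hlen : ∀ x : List Char, PySem.Str.len (String.ofList x) = (x.length : Int) := by
      intro x; simp [PySem.Str.len]
    rw [hlen g]
    rw [show (PySem.Str.len ∘ String.ofList) = (fun x : List Char => (x.length : Int)) from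
      funext (fun x => hlen x)]
    rw [PySem.List.max?_id_cons, Option.getD_some, List.foldl_map]
    simp [pvM]

-- ===== VERDICT (by name: the statement is the Claim_ definition above) =====
theorem max_consec_zeros_spec : Claim_equal_max_consec_zeros := by
  intro n _ _
  unfold Spec_max_consec_zeros max_consec_zeros max_consec_zeros_alt
  simp only []
  rw [pvA_key n, pvB_key n]
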